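-- pv_equiv track=rewrite | github.com/Cho-El/Python-coding-test-practice | 기타 코딩 문제/그리디/모험가.py | team2
-- ===== SOURCE A (Python) =====
-- def team2(N, scary_stat):
-- 	scary_stat.sort()
--
-- 	team_num = 0
-- 	cnt = 0
-- 	for i in scary_stat:
-- 		cnt += 1
-- 		if cnt >= i:
-- 			team_num += 1
-- 			cnt = 0
-- 	return team_num
-- ===== SOURCE B (Python) =====
-- def team2(N, scary_stat):
--     scary_stat.sort()
--     team_num = 0
--     leftover = 0
--     i = 0
--     n = len(scary_stat)
--     while i < n:
--         v = scary_stat[i]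
--         j = i
--         while j < n and scary_stat[j] == v:
--             j += 1
--         c = j - i
--         if v <= 0:
--             # every adventurer with non-positive fear forms a team alone
--             team_num += c
--             leftover = 0
--         else:
--             avail = leftover + c
--             team_num += avail // v
--             leftover = avail % v
--         i = j
--     return team_num
-- ===== Notes on version B (the rewrite author's own statement) =====
-- stated objective: alternative
-- what changed: B replaces A's per-element incremental threshold scan (cnt/reset) with a run-length pass over the sorted list: for each distinct fear value v with multiplicity c it adds (leftover+c)//v teams by integer division and carries (leftover+c)%v.
import Mathlib
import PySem

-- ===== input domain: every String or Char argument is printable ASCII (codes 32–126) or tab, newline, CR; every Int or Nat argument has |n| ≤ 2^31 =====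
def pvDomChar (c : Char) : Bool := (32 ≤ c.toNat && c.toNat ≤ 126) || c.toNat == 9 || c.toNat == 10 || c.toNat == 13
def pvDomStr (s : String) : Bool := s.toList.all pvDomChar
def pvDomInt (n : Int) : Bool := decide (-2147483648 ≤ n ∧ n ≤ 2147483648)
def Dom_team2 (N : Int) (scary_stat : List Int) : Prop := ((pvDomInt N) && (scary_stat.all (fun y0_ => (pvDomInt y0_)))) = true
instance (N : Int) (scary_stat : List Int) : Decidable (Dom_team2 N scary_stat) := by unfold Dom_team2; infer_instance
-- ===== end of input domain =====

-- B replaces A's per-element cnt/reset scan with a run-length pass over the sorted list using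
-- integer division per distinct value; both (like the Pythons) sort the input in place first,
-- and the equivalence proved is about the return value.


-- ===== PORT A =====
-- scary_stat.sort(); then the incremental scan with cnt/reset
def team2 (N : Int) (scary_stat : List Int) : Int :=
  let s := PySem.List.sorted scary_stat (fun x => x) false
  (s.foldl (fun (st : Int × Int) i =>
      let cnt := st.2 + 1
      if cnt ≥ i then (st.1 + 1, 0) else (st.1, cnt)) (0, 0)).1

-- ===== PORT B =====
-- inner while loop of Source B: length of the leading run of v, and the remainder of the list
def runSplit (v : Int) : List Int → Nat × List Int
  | [] => (0, [])
  | x :: xs =>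
    if x = v then ((runSplit v xs).1 + 1, (runSplit v xs).2)
    else (0, x :: xs)

lemma runSplit_len (v : Int) : ∀ xs : List Int, (runSplit v xs).2.length ≤ xs.length := by
  intro xs
  induction xs with
  | nil => simp [runSplit]
  | cons x xs ih =>
    by_cases h : x = v <;> simp [runSplit, h]
    omega

-- outer while loop of Source B, state (team_num, leftover)
def altLoop : Int → Int → List Int → Int
  | t, _, [] => t
  | t, lo, v :: xs =>
    let c : Int := ((runSplit v xs).1 : Int) + 1
    let rest := (runSplit v xs).2
    if v ≤ 0 then altLoop (t + c) 0 rest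
    else altLoop (t + PySem.Int.floordiv (lo + c) v) (PySem.Int.mod (lo + c) v) rest
termination_by _ _ l => l.length
decreasing_by
  all_goals simpa using Nat.lt_succ_of_le (runSplit_len v xs)

def team2_alt (N : Int) (scary_stat : List Int) : Int :=
  altLoop 0 0 (PySem.List.sorted scary_stat (fun x => x) false)

-- ===== PRECONDITION & SPEC =====
def Spec_team2 (N : Int) (scary_stat : List Int) (out : Int) : Prop := out = team2_alt N scary_stat
instance (N : Int) (scary_stat : List Int) (out : Int) : Decidable (Spec_team2 N scary_stat out) := by unfold Spec_team2; infer_instance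

-- ===== CLAIM (what is proved, stated in full; the proofs are below) =====
def Claim_equal_team2 : Prop := ∀ (N : Int) (scary_stat : List Int), Dom_team2 N scary_stat → Spec_team2 N scary_stat (team2 N scary_stat)

-- ===== LEMMAS AND PROOFS =====

-- A's loop body, named for the proofs
def fA (st : Int × Int) (i : Int) : Int × Int :=
  let cnt := st.2 + 1
  if cnt ≥ i then (st.1 + 1, 0) else (st.1, cnt)

lemma altLoop_cons (t lo v : Int) (xs : List Int) :
    altLoop t lo (v :: xs) =
      (if v ≤ 0 then altLoop (t + (((runSplit v xs).1 : Int) + 1)) 0 (runSplit v xs).2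
       else altLoop (t + PySem.Int.floordiv (lo + (((runSplit v xs).1 : Int) + 1)) v)
              (PySem.Int.mod (lo + (((runSplit v xs).1 : Int) + 1)) v) (runSplit v xs).2) := by
  rw [altLoop]

lemma runSplit_decomp (v : Int) : ∀ xs : List Int,
    xs = List.replicate (runSplit v xs).1 v ++ (runSplit v xs).2 ∧
    (∀ y, (runSplit v xs).2.head? = some y → y ≠ v) := by
  intro xs
  induction xs with
  | nil => simp [runSplit]
  | cons x xs ih =>
    by_cases h : x = v
    · simpa [runSplit, h, List.replicate_succ] using ih
    · simp [runSplit, h]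

-- a run of a non-positive value: every member teams alone, cnt stays 0
lemma negRun {v : Int} (hv : v ≤ 0) (rest : List Int) :
    ∀ (c : Nat) (t : Int),
      List.foldl fA (t, 0) (List.replicate c v ++ rest) = List.foldl fA (t + c, 0) rest := by
  intro c
  induction c with
  | zero => intro t; simp
  | succ c ih =>
    intro t
    have hstep : fA (t, 0) v = (t + 1, 0) := by
      simp [fA]; omega
    rw [List.replicate_succ, List.cons_append, List.foldl_cons, hstep, ih]
    have hx : t + ((c + 1 : ℕ) : Int) = t + 1 + (c : Int) := by push_cast; ring
    rw [hx]

-- a run of a positive value: the scan performs floor division with remainder carry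
lemma posRun {v : Int} (hv : 1 ≤ v) (rest : List Int) :
    ∀ (c : Nat) (t k : Int), 0 ≤ k → k < v →
      List.foldl fA (t, k) (List.replicate c v ++ rest) =
        List.foldl fA (t + (k + c) / v, (k + c) % v) rest := by
  intro c
  induction c with
  | zero =>
    intro t k hk0 hkv
    simp only [Nat.cast_zero, add_zero, List.replicate_zero, List.nil_append]
    rw [Int.ediv_eq_zero_of_lt hk0 (by simpa using hkv), Int.emod_eq_of_lt hk0 (by simpa using hkv)]
    simp
  | succ c ih =>
    intro t k hk0 hkv
    rw [List.replicate_succ, List.cons_append, List.foldl_cons]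
    by_cases h : k + 1 ≥ v
    · have hkv1 : k + 1 = v := by omega
      have hstep : fA (t, k) v = (t + 1, 0) := by simp [fA]; omega
      rw [hstep, ih (t + 1) 0 le_rfl (by omega)]
      have key : k + (↑(c + 1) : Int) = (0 + (c : Int)) + 1 * v := by push_cast; omega
      have ed : (k + (↑(c + 1) : Int)) / v = (0 + (c : Int)) / v + 1 := by
        rw [key, Int.add_mul_ediv_right _ _ (by omega : v ≠ 0)]
      have em : (k + (↑(c + 1) : Int)) % v = (0 + (c : Int)) % v := by
        rw [key, Int.add_mul_emod_self_right]
      rw [ed, em]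
      have h3 : t + ((0 + (c : Int)) / v + 1) = t + 1 + (0 + (c : Int)) / v := by ring
      rw [h3]
    · have hstep : fA (t, k) v = (t, k + 1) := by simp [fA]; omega
      rw [hstep, ih t (k + 1) (by omega) (by omega)]
      have h1 : k + 1 + (c : Int) = k + (↑(c + 1) : Int) := by push_cast; ring
      rw [h1]

lemma rest_gt {v : Int} {rest : List Int}
    (hle : ∀ x ∈ rest, v ≤ x) (hp : rest.Pairwise (· ≤ ·))
    (hh : ∀ y, rest.head? = some y → y ≠ v) :
    ∀ x ∈ rest, v < x := by
  cases rest with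
  | nil => simp
  | cons h tl =>
    intro x hx
    have hhv : v < h := lt_of_le_of_ne (hle h (by simp)) (Ne.symm (hh h rfl))
    rcases List.mem_cons.mp hx with rfl | hx'
    · exact hhv
    · exact lt_of_lt_of_le hhv ((List.pairwise_cons.mp hp).1 x hx')

-- the main invariant: on a sorted list, if 0 ≤ k and k is below every positive element,
-- A's scan and B's run-length loop agree
lemma main_inv : ∀ (n : Nat) (s : List Int), s.length ≤ n → s.Pairwise (· ≤ ·) →
    ∀ (t k : Int), 0 ≤ k → (∀ x ∈ s, 0 < x → k < x) →
      (List.foldl fA (t, k) s).1 = altLoop t k s := by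
  intro n
  induction n with
  | zero =>
    intro s hs _ t k _ _
    have : s = [] := List.eq_nil_of_length_eq_zero (Nat.le_zero.mp hs)
    subst this; simp [altLoop]
  | succ n ih =>
    intro s hs hsort t k hk0 hinv
    cases s with
    | nil => simp [altLoop]
    | cons v xs =>
      obtain ⟨hdec, hhead⟩ := runSplit_decomp v xs
      set c := (runSplit v xs).1 with hc
      set rest := (runSplit v xs).2 with hr
      have hvle : ∀ x ∈ xs, v ≤ x := (List.pairwise_cons.mp hsort).1
      have hxp : xs.Pairwise (· ≤ ·) := (List.pairwise_cons.mp hsort).2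
      have hrsub : rest.Sublist xs := hdec ▸ (List.sublist_append_right _ _)
      have hrp : rest.Pairwise (· ≤ ·) := hxp.sublist hrsub
      have hrle : ∀ x ∈ rest, v ≤ x := fun x hx => hvle x (hrsub.mem hx)
      have hrgt : ∀ x ∈ rest, v < x := rest_gt hrle hrp hhead
      have hrlen : rest.length ≤ n := by
        have h1 : rest.length ≤ xs.length := by rw [hr]; exact runSplit_len v xs
        have h2 : xs.length + 1 ≤ n + 1 := by simpa using hs
        omega
      have hfull : v :: xs = List.replicate (c + 1) v ++ rest := by
        rw [List.replicate_succ, List.cons_append]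
        exact congrArg (v :: ·) hdec
      by_cases hv : v ≤ 0
      · -- non-positive run: first element always teams (cnt ≥ 1 > 0 ≥ v), then negRun
        have hstep : fA (t, k) v = (t + 1, 0) := by simp [fA]; omega
        have heq : List.foldl fA (t, k) (v :: xs) = List.foldl fA (t + 1 + c, 0) rest := by
          rw [show v :: xs = v :: (List.replicate c v ++ rest) from congrArg (v :: ·) hdec,
            List.foldl_cons, hstep, negRun hv rest c (t + 1)]
        rw [heq, ih rest hrlen hrp (t + 1 + c) 0 le_rfl (fun x hx _ => by
          have := hrgt x hx; omega)]
        show altLoop (t + 1 + ↑c) 0 rest = altLoop t k (v :: xs)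
        rw [altLoop_cons, if_pos hv, ← hc, ← hr]
        have : t + ((c : Int) + 1) = t + 1 + (c : Int) := by ring
        rw [this]
      · -- positive run: posRun with 0 ≤ k < v
        have hv1 : 1 ≤ v := by omega
        have hkv : k < v := hinv v (by simp) (by omega)
        have heq := posRun hv1 rest (c + 1) t k hk0 hkv
        rw [hfull, heq]
        have hmodlt : (k + ↑(c + 1)) % v < v := Int.emod_lt_of_pos _ (by omega)
        have hmod0 : 0 ≤ (k + ↑(c + 1)) % v := Int.emod_nonneg _ (by omega)
        rw [ih rest hrlen hrp _ _ hmod0 (fun x hx _ => lt_trans hmodlt (hrgt x hx))]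
        rw [← hfull, altLoop_cons, if_neg hv, ← hc, ← hr]
        rw [PySem.Int.floordiv_eq_ediv_of_pos (by omega : (0:Int) < v),
          PySem.Int.mod_eq_emod_of_pos (by omega : (0:Int) < v)]
        have hcast : (↑(c + 1) : Int) = (c : Int) + 1 := by push_cast; ring
        rw [hcast]

-- ===== VERDICT (by name: the statement is the Claim_ definition above) =====
theorem team2_spec : Claim_equal_team2 := by
  intro N scary_stat _
  show _ = _
  unfold team2 team2_alt
  have hp : (PySem.List.sorted scary_stat (fun x => x) false).Pairwise (· ≤ ·) := by
    simpa using PySem.List.sorted_pairwise (xs := scary_stat) (key := fun x => x)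
  exact main_inv _ _ le_rfl hp 0 0 le_rfl (fun x _ hx => hx)
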